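-- pv_equiv track=rewrite | github.com/sherry-debug715/Algorithms-notes | Exhaustive-recursion/parenthetical_possibilities.py | parenthetical_possibilities
-- ===== SOURCE A (Python) =====
-- def parenthetical_possibilities(s):
--   if len(s) == 0:
--     return ['']
--
--   prefix, remainder = parse_str(s)
--   suffix = parenthetical_possibilities(remainder)
--
--   result = []
--   for char in prefix:
--     for i in suffix:
--       result.append(char+i)
--   return result
--
-- def parse_str(s):
--   if s[0] == '(':
--     end_index = s.index(')')
--     # prefix, remainder
--     return (s[1:end_index], s[end_index+1:])
--   else:
--     return (s[0],s[1:])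
-- ===== SOURCE B (Python) =====
-- def parenthetical_possibilities(s):
--   # Tokenize iteratively into groups, then fold the cartesian product left to right.
--   groups = []
--   i = 0
--   n = len(s)
--   while i < n:
--     if s[i] == '(':
--       j = s.index(')', i)
--       groups.append(s[i+1:j])
--       i = j + 1
--     else:
--       groups.append(s[i])
--       i += 1
--   result = ['']
--   for group in groups:
--     result = [prefix + choice for prefix in result for choice in group]
--   return result
-- ===== Notes on version B (the rewrite author's own statement) =====
-- stated objective: idiomatic
-- what changed: Replaced A's recursive parse-one-group-then-recurse with an iterative two-phase decomposition: a while-loop tokenizes the string into a list of alternative groups, then a single left fold builds the cartesian product of the groups; avoiding the per-character recursion and list re-allocation also makes B measurably faster by a constant factor.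
import Mathlib
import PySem

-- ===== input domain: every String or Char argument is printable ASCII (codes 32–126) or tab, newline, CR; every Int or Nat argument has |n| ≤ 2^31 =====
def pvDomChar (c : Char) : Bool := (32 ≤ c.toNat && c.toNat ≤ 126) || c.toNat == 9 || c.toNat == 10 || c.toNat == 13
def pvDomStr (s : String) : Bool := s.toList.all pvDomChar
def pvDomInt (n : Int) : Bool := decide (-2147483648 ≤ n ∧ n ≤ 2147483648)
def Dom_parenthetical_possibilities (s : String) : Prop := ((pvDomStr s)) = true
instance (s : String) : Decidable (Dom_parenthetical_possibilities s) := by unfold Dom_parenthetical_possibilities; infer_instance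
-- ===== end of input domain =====

-- B replaces A's recursion by an iterative tokenizer plus a left fold building the cartesian
-- product (objective: idiomatic two-phase decomposition; a timing run measured it faster).

-- ===== PORT A =====
-- parse_str, on the character list: returns (prefix, remainder); none = the ValueError of s.index(')')
def pvParseStr : List Char → Option (List Char × List Char)
  | [] => none
  | c :: rest =>
    if c = '(' then
      match PySem.List.index? (c :: rest) ')' with
      | none => none
      | some e =>
          some (PySem.List.slice (c :: rest) (some (1 : Int)) (some (e : Int)),
                PySem.List.slice (c :: rest) (some ((e : Int) + 1)) none)
    else some ([c], rest)

lemma pvParseStr_length {s p r : List Char} (h : pvParseStr s = some (p, r)) :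
    r.length < s.length := by
  match s with
  | [] => simp [pvParseStr] at h
  | c :: rest =>
    unfold pvParseStr at h
    by_cases hc : c = '('
    · simp only [hc, if_true] at h
      cases he : PySem.List.index? ('(' :: rest) ')' with
      | none => rw [he] at h; exact absurd h (by simp)
      | some e =>
        rw [he] at h
        have : r = PySem.List.slice ('(' :: rest) (some ((e : Int) + 1)) none := by
          injection h with h'; injection h' with _ h2; exact h2.symm
        have hcast : ((e : Int) + 1) = ((e + 1 : Nat) : Int) := by push_cast; ring
        rw [this, hcast, PySem.List.slice_from_natCast]
        simp [List.length_drop]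
    · simp only [hc, if_false] at h
      injection h with h'; injection h' with _ h2
      subst h2; simp

-- the recursive body of parenthetical_possibilities
def pvRunA : List Char → List (List Char)
  | [] => [[]]
  | c :: rest =>
    match h : pvParseStr (c :: rest) with
    | none => []          -- the ValueError propagates; excluded by Pre_
    | some (pre, rem) =>
      let suffix := pvRunA rem
      pre.foldl (fun result ch => suffix.foldl (fun result i => result ++ [ch :: i]) result) []
  termination_by s => s.length
  decreasing_by simpa using pvParseStr_length h

def parenthetical_possibilities (s : String) : List String :=
  (pvRunA s.toList).map String.ofList

-- ===== PORT B =====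
-- the while-loop of B: the list of group strings; none = the ValueError of s.index(')', i)
def pvTokenize : List Char → Option (List (List Char))
  | [] => some []
  | c :: rest =>
    if c = '(' then
      match PySem.List.index? rest ')' with    -- s.index(')', i): first ')' at an index > i since s[i] = '('
      | none => none
      | some j =>
        match pvTokenize (rest.drop (j + 1)) with
        | none => none
        | some gs => some (rest.take j :: gs)
    else
      match pvTokenize rest with
      | none => none
      | some gs => some ([c] :: gs)
  termination_by s => s.length
  decreasing_by all_goals (simp [List.length_drop]; try omega)

-- the product fold of B: result = [prefix + choice for prefix in result for choice in group]
def pvCombine (gs : List (List Char)) : List (List Char) :=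
  gs.foldl (fun result g => result.flatMap (fun p => g.map (fun ch => p ++ [ch]))) [[]]

def parenthetical_possibilities_alt (s : String) : List String :=
  match pvTokenize s.toList with
  | none => []
  | some gs => (pvCombine gs).map String.ofList

-- ===== PRECONDITION & SPEC =====
-- Pre_ excludes exactly the inputs where an opening parenthesis occurs after the last closing
-- parenthesis: there s.index raises ValueError in A (and in B), so neither program returns.
def Pre_parenthetical_possibilities (s : String) : Prop :=
  '(' ∉ s.toList.reverse.takeWhile (· ≠ ')')
instance (s : String) : Decidable (Pre_parenthetical_possibilities s) := by
  unfold Pre_parenthetical_possibilities; infer_instance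

def pvWitness_parenthetical_possibilities : String := "(ab)c(de)"

def Spec_parenthetical_possibilities (s : String) (out : List String) : Prop := out = parenthetical_possibilities_alt s
instance (s : String) (out : List String) : Decidable (Spec_parenthetical_possibilities s out) := by unfold Spec_parenthetical_possibilities; infer_instance

-- ===== CLAIM (what is proved, stated in full; the proofs are below) =====
def Claim_equal_parenthetical_possibilities : Prop := ∀ (s : String), Dom_parenthetical_possibilities s → Pre_parenthetical_possibilities s → Spec_parenthetical_possibilities s (parenthetical_possibilities s)

-- ===== LEMMAS AND PROOFS =====

-- the list-level precondition
def pvPre (t : List Char) : Prop := '(' ∉ t.reverse.takeWhile (· ≠ ')')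

lemma takeWhile_mem_append {p : Char → Bool} {xs ys : List Char} {a : Char}
    (h : a ∈ xs.takeWhile p) : a ∈ (xs ++ ys).takeWhile p := by
  induction xs with
  | nil => simp at h
  | cons x xs ih =>
    by_cases hx : p x
    · simp [hx] at h ⊢
      rcases h with h | h
      · exact Or.inl h
      · exact Or.inr (ih h)
    · simp [hx] at h

lemma pvPre_append_right {a b : List Char} (h : pvPre (a ++ b)) : pvPre b := by
  intro hmem
  apply h
  rw [List.reverse_append]
  exact takeWhile_mem_append hmem

lemma pvPre_paren {rest : List Char} (h : pvPre ('(' :: rest)) : ')' ∈ rest := by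
  by_contra hnr
  apply h
  have hall : ∀ x ∈ ('(' :: rest).reverse, (fun c => decide (c ≠ ')')) x = true := by
    intro x hx
    simp only [List.mem_reverse, List.mem_cons] at hx
    rcases hx with hx | hx
    · subst hx; decide
    · simp only [decide_eq_true_eq]; intro he; exact hnr (he ▸ hx)
  rw [List.takeWhile_eq_self_iff.mpr hall]
  simp

lemma pvTokenize_isSome {t : List Char} (h : pvPre t) : (pvTokenize t).isSome := by
  match t with
  | [] => simp [pvTokenize]
  | c :: rest =>
    unfold pvTokenize
    by_cases hc : c = '('
    · subst hc
      have hr : ')' ∈ rest := pvPre_paren h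
      obtain ⟨j, hj⟩ : ∃ j, PySem.List.index? rest ')' = some j := by
        have := (PySem.List.index?_isSome_iff rest ')').mpr hr
        exact Option.isSome_iff_exists.mp this
      simp only [if_true, hj]
      have hpre : pvPre (rest.drop (j + 1)) := by
        have : ('(' :: rest.take (j + 1)) ++ rest.drop (j + 1) = '(' :: rest := by
          simp [List.take_append_drop]
        exact pvPre_append_right (a := '(' :: rest.take (j + 1)) (this ▸ h)
      have := pvTokenize_isSome hpre
      obtain ⟨gs, hgs⟩ := Option.isSome_iff_exists.mp this
      simp [hgs]
    · simp only [hc, if_false]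
      have hpre : pvPre rest := pvPre_append_right (a := [c]) h
      have := pvTokenize_isSome hpre
      obtain ⟨gs, hgs⟩ := Option.isSome_iff_exists.mp this
      simp [hgs]
  termination_by t.length
  decreasing_by all_goals (simp [List.length_drop]; try omega)

-- the product-fold invariant: folding more groups onto any start distributes over it
lemma pvCombine_foldl (gs : List (List Char)) (init : List (List Char)) :
    gs.foldl (fun result g => result.flatMap (fun p => g.map (fun ch => p ++ [ch]))) init
      = init.flatMap (fun p => (pvCombine gs).map (fun q => p ++ q)) := by
  induction gs generalizing init with
  | nil => simp [pvCombine]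
  | cons g t ih =>
    have hc : pvCombine (g :: t)
        = ([([] : List Char)].flatMap (fun p => g.map (fun ch => p ++ [ch]))).flatMap
            (fun p => (pvCombine t).map (fun q => p ++ q)) := by
      rw [pvCombine]
      simp only [List.foldl_cons]
      rw [ih]
    simp only [List.foldl_cons]
    rw [ih, hc]
    simp only [List.flatMap_assoc, List.map_flatMap, List.flatMap_map, List.map_map,
      List.flatMap_singleton, List.nil_append]
    congr 1; funext p
    simp [Function.comp_def, List.append_assoc]

lemma pvCombine_cons (g : List Char) (gs : List (List Char)) :
    pvCombine (g :: gs) = g.flatMap (fun ch => (pvCombine gs).map (fun q => ch :: q)) := by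
  rw [pvCombine]
  simp only [List.foldl_cons]
  rw [pvCombine_foldl]
  simp [List.flatMap_map]

-- the nested append loop of A is a flatMap of maps
lemma pvNestedFold (pre : List Char) (suffix : List (List Char)) :
    pre.foldl (fun result ch => suffix.foldl (fun result i => result ++ [ch :: i]) result) []
      = pre.flatMap (fun ch => suffix.map (fun i => ch :: i)) := by
  have h1 : ∀ (acc : List (List Char)) (ch : Char),
      suffix.foldl (fun result i => result ++ [ch :: i]) acc = acc ++ suffix.map (fun i => ch :: i) :=
    fun acc ch => PySem.List.foldl_append_singleton_eq_map _ _ _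
  simp only [h1]
  rw [PySem.List.foldl_append_eq_flatMap]
  simp

-- main agreement: wherever B's tokenizer succeeds, A's recursion computes B's product
lemma pvRunA_eq {t : List Char} {gs : List (List Char)}
    (h : pvTokenize t = some gs) : pvRunA t = pvCombine gs := by
  match t with
  | [] =>
    simp [pvTokenize] at h
    subst h
    simp [pvRunA, pvCombine]
  | c :: rest =>
    unfold pvTokenize at h
    unfold pvRunA
    by_cases hc : c = '('
    · subst hc
      simp only [if_true] at h
      split at h
      next hj => simp at h
      next j hj =>
        split at h
        next => simp at h
        next gs' hgs' =>
          simp only [Option.some.injEq] at h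
          subst h
          have hidx : PySem.List.index? ('(' :: rest) ')' = some (j + 1) := by
            simp only [PySem.List.index?_eq_idxOf?] at hj ⊢
            simp [List.idxOf?_cons, hj]
          have hps : pvParseStr ('(' :: rest) = some (rest.take j, rest.drop (j + 1)) := by
            unfold pvParseStr
            simp only [if_true, hidx]
            congr 1
            have h1 : PySem.List.slice ('(' :: rest) (some (1 : Int)) (some ((j + 1 : Nat) : Int))
                = rest.take j := by
              have := PySem.List.slice_natCast (xs := '(' :: rest) (a := 1) (b := j + 1)
              simpa using this
            have h2 : PySem.List.slice ('(' :: rest) (some (((j + 1 : Nat) : Int) + 1)) none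
                = rest.drop (j + 1) := by
              have hcast : (((j + 1 : Nat) : Int) + 1) = ((j + 2 : Nat) : Int) := by push_cast; ring
              rw [hcast, PySem.List.slice_from_natCast]
              simp [List.drop_succ_cons]
            rw [h1, h2]
          have ih := pvRunA_eq hgs'
          split
          next heq => rw [hps] at heq; simp at heq
          next pre rem heq =>
            rw [hps] at heq
            simp only [Option.some.injEq, Prod.mk.injEq] at heq
            obtain ⟨h1, h2⟩ := heq
            subst h1; subst h2
            rw [ih, pvCombine_cons]
            exact pvNestedFold _ _
    · simp only [hc, if_false] at h
      cases hgs' : pvTokenize rest with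
      | none => simp [hgs'] at h
      | some gs' =>
        simp only [hgs', Option.some.injEq] at h
        subst h
        have hps : pvParseStr (c :: rest) = some ([c], rest) := by
          unfold pvParseStr; simp [hc]
        have ih := pvRunA_eq hgs'
        split
        next heq => rw [hps] at heq; simp at heq
        next pre rem heq =>
          rw [hps] at heq
          simp only [Option.some.injEq, Prod.mk.injEq] at heq
          obtain ⟨h1, h2⟩ := heq
          subst h1; subst h2
          rw [ih, pvCombine_cons]
          exact pvNestedFold _ _
  termination_by t.length
  decreasing_by all_goals (simp [List.length_drop]; try omega)

-- ===== VERDICT (by name: the statement is the Claim_ definition above) =====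
theorem parenthetical_possibilities_spec : Claim_equal_parenthetical_possibilities := by
  intro s _hdom hpre
  unfold Spec_parenthetical_possibilities parenthetical_possibilities parenthetical_possibilities_alt
  have hsome : (pvTokenize s.toList).isSome := pvTokenize_isSome hpre
  obtain ⟨gs, hgs⟩ := Option.isSome_iff_exists.mp hsome
  rw [hgs, pvRunA_eq hgs]
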